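-- pv_equiv track=rewrite | github.com/shadow036/computational_intelligence | lab2/lab2.py | evaluate
-- ===== SOURCE A (Python) =====
-- N = 20
--
-- def evaluate(c_solutions, total):
--     e_solutions = c_solutions.copy()    # in order to make clear the difference between candidate and evaluated solutions
--     for index in range(len(e_solutions)):
--         counters = [0 for _ in range(N)]
--         if type(e_solutions[index][0]) is int:
--             counters = [counters[_]+1 if _ in e_solutions[index] else counters[_] for _ in range(N)]
--         else:
--             for e in e_solutions[index]:
--                 counters = [counters[_]+1 if _ in e else counters[_] for _ in range(N)]
--
--         partial_fitness = sum([1 - counters[_] if counters[_] > 1 else counters[_] for _ in range(N)])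
--         offset = (total if counters.count(0) > 0 else 0)
--         e_solutions[index] = (e_solutions[index], partial_fitness - offset)
--
--     return e_solutions
-- ===== SOURCE B (Python) =====
-- N = 20
--
-- def evaluate(c_solutions, total):
--     result = []
--     for s in c_solutions:
--         k = len({v for v in s if 0 <= v < N})
--         result.append((s, k if k == N else k - total))
--     return result
-- ===== Notes on version B (the rewrite author's own statement) =====
-- stated objective: simpler
-- what changed: B drops A's 20-slot counter list and its three fixed range(N) passes (build counters, sum fitness terms, count zeros) and instead counts each solution's distinct covered values 0..19 once with a set comprehension, returning k if k == N else k - total. (constant-factor: one pass over each solution instead of three 20-wide scans with list-membership tests).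
import Mathlib
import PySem

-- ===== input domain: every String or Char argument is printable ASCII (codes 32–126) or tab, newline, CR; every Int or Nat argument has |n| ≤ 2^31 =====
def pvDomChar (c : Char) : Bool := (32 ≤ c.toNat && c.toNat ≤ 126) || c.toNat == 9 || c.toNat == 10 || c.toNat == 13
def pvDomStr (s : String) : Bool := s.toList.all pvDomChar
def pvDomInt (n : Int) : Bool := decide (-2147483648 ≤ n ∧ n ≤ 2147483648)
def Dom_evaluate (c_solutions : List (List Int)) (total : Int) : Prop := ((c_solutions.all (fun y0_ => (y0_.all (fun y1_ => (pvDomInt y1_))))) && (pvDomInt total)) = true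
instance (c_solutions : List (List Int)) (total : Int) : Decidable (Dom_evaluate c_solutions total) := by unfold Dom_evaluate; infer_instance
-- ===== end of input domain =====

-- B replaces A's fixed 20-counter list and its three range(N) scans by counting the
-- distinct covered values of each solution once (objective: simpler; return value only,
-- A's copy() leaves the caller's list unmutated either way).

-- ===== PORT A =====
-- Under the Int element type of this task, `type(e_solutions[index][0]) is int` is always
-- true on nonempty solutions, so only that branch is ported; on an empty solution Python
-- raises IndexError at that check (excluded by Pre_).
def countersA (s : List Int) : List Int :=
  -- counters = [0 for _ in range(N)]; counters = [counters[_]+1 if _ in sol else counters[_] for _ in range(N)]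
  let counters0 : List Int := (List.range 20).map (fun _ => (0 : Int))
  (List.range 20).map (fun (i : Nat) =>
    if (i : Int) ∈ s then counters0.getD i 0 + 1 else counters0.getD i 0)

def evaluateOne (s : List Int) (total : Int) : List Int × Int :=
  let counters := countersA s
  let partial_fitness : Int :=
    ((List.range 20).map (fun (i : Nat) =>
        if counters.getD i 0 > 1 then 1 - counters.getD i 0 else counters.getD i 0)).sum
  let offset : Int := if counters.count 0 > 0 then total else 0
  (s, partial_fitness - offset)

def evaluate (c_solutions : List (List Int)) (total : Int) : List (List Int × Int) :=
  c_solutions.map (fun s => evaluateOne s total)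

-- ===== PORT B =====
def evaluate_alt (c_solutions : List (List Int)) (total : Int) : List (List Int × Int) :=
  c_solutions.foldl (fun result s =>
    let k : Int := (PySem.Set.ofList (s.filter (fun v => 0 ≤ v && v < 20))).length
    result ++ [(s, if k == 20 then k else k - total)]) []

-- ===== PRECONDITION & SPEC =====
-- Pre_ excludes inputs containing an empty solution: there Python A raises IndexError
-- at the `type(e_solutions[index][0])` check.
def Pre_evaluate (c_solutions : List (List Int)) (total : Int) : Prop :=
  ∀ s ∈ c_solutions, s ≠ []
instance (c_solutions : List (List Int)) (total : Int) : Decidable (Pre_evaluate c_solutions total) := by unfold Pre_evaluate; infer_instance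
def pvWitness_evaluate : List (List Int) × Int := ([[0, 1, 19], [5, 5]], 3)

def Spec_evaluate (c_solutions : List (List Int)) (total : Int) (out : List (List Int × Int)) : Prop := out = evaluate_alt c_solutions total
instance (c_solutions : List (List Int)) (total : Int) (out : List (List Int × Int)) : Decidable (Spec_evaluate c_solutions total out) := by unfold Spec_evaluate; infer_instance

-- ===== CLAIM (what is proved, stated in full; the proofs are below) =====
def Claim_equal_evaluate : Prop := ∀ (c_solutions : List (List Int)) (total : Int), Dom_evaluate c_solutions total → Pre_evaluate c_solutions total → Spec_evaluate c_solutions total (evaluate c_solutions total)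

-- ===== LEMMAS AND PROOFS =====

-- The number of values 0..19 present in s (what A's counters record).
def coverage (s : List Int) : Nat :=
  (List.range 20).countP (fun (i : Nat) => decide ((i : Int) ∈ s))

lemma coverage_le (s : List Int) : coverage s ≤ 20 := by
  have := List.countP_le_length (p := fun (i : Nat) => decide ((i : Int) ∈ s)) (l := List.range 20)
  simpa [coverage] using this

lemma countersA_eq (s : List Int) :
    countersA s = (List.range 20).map (fun (i : Nat) => if (i : Int) ∈ s then (1 : Int) else 0) := by
  unfold countersA
  refine List.map_congr_left ?_
  intro i hi
  have hi20 : i < 20 := List.mem_range.mp hi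
  rw [PySem.List.getD_map_range _ _ _ _ hi20]
  split <;> simp

-- B's distinct covered values are exactly A's covered indices.
lemma set_len_eq_coverage (s : List Int) :
    (PySem.Set.ofList (s.filter (fun v => 0 ≤ v && v < 20))).length = coverage s := by
  rw [← PySem.List.dedup_eq_ofList]
  set L : List Int := PySem.List.dedup (s.filter (fun v => 0 ≤ v && v < 20)) with hL
  set R : List Int := ((List.range 20).filter (fun (i : Nat) => decide ((i : Int) ∈ s))).map
      (fun (i : Nat) => (i : Int)) with hR
  have hLn : L.Nodup := PySem.List.nodup_dedup _
  have hRn : R.Nodup := by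
    refine List.Nodup.map (fun a b h => by exact_mod_cast h) (List.Nodup.filter _ List.nodup_range)
  have hmem : ∀ v : Int, v ∈ L ↔ v ∈ R := by
    intro v
    simp only [hL, hR, PySem.List.mem_dedup, List.mem_filter, List.mem_map, List.mem_range,
      Bool.and_eq_true, decide_eq_true_eq]
    constructor
    · rintro ⟨hv, h0, h1⟩
      exact ⟨v.toNat, ⟨by omega, by simpa [Int.toNat_of_nonneg h0] using hv⟩, by omega⟩
    · rintro ⟨i, ⟨hi, hm⟩, rfl⟩
      exact ⟨hm, by omega, by exact_mod_cast hi⟩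
  have hfin : L.toFinset = R.toFinset := by
    ext v; simpa [List.mem_toFinset] using hmem v
  have hlen : L.length = R.length := by
    rw [← List.toFinset_card_of_nodup hLn, ← List.toFinset_card_of_nodup hRn, hfin]
  rw [hlen, hR, List.length_map, coverage, List.countP_eq_length_filter]

-- A's per-solution computation in closed form.
lemma evaluateOne_eq (s : List Int) (total : Int) :
    evaluateOne s total =
      (s, if coverage s = 20 then (coverage s : Int) else (coverage s : Int) - total) := by
  unfold evaluateOne
  rw [countersA_eq]
  have hget : ∀ i : Nat, i < 20 →
      (((List.range 20).map (fun (i : Nat) => if (i : Int) ∈ s then (1 : Int) else 0)).getD i 0)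
        = (if (i : Int) ∈ s then (1 : Int) else 0) :=
    fun i hi => PySem.List.getD_map_range _ _ _ _ hi
  have hpf : (((List.range 20).map (fun (i : Nat) =>
      if (((List.range 20).map (fun (j : Nat) => if (j : Int) ∈ s then (1 : Int) else 0)).getD i 0) > 1
      then 1 - (((List.range 20).map (fun (j : Nat) => if (j : Int) ∈ s then (1 : Int) else 0)).getD i 0)
      else (((List.range 20).map (fun (j : Nat) => if (j : Int) ∈ s then (1 : Int) else 0)).getD i 0))).sum)
      = (coverage s : Int) := by
    have hmapeq : ((List.range 20).map (fun (i : Nat) =>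
        if (((List.range 20).map (fun (j : Nat) => if (j : Int) ∈ s then (1 : Int) else 0)).getD i 0) > 1
        then 1 - (((List.range 20).map (fun (j : Nat) => if (j : Int) ∈ s then (1 : Int) else 0)).getD i 0)
        else (((List.range 20).map (fun (j : Nat) => if (j : Int) ∈ s then (1 : Int) else 0)).getD i 0)))
        = ((List.range 20).map (fun (i : Nat) =>
            if (fun (i : Nat) => decide ((i : Int) ∈ s)) i = true then (1 : Int) else 0)) := by
      refine List.map_congr_left ?_
      intro i hi
      rw [hget i (List.mem_range.mp hi)]
      by_cases h : (i : Int) ∈ s <;> simp [h]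
    rw [hmapeq, PySem.List.sum_map_ite_one_zero]; rfl
  have hcount : (((List.range 20).map (fun (i : Nat) =>
        if (i : Int) ∈ s then (1 : Int) else 0)).count 0 > 0) ↔ coverage s < 20 := by
    rw [List.count_eq_countP, List.countP_map]
    have hsplit := List.length_eq_countP_add_countP
      (p := fun (i : Nat) => decide ((i : Int) ∈ s)) (l := List.range 20)
    have hcp : List.countP ((fun x : Int => x == 0) ∘ fun (i : Nat) =>
        if (i : Int) ∈ s then (1 : Int) else 0) (List.range 20)
        = List.countP (fun (i : Nat) => decide ¬((i : Int) ∈ s)) (List.range 20) := by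
      refine List.countP_congr ?_
      intro i _
      by_cases h : (i : Int) ∈ s <;> simp [h, Function.comp]
    rw [hcp]
    simp only [List.length_range, decide_eq_true_eq] at hsplit
    unfold coverage
    omega
  simp only [hpf, Prod.mk.injEq, true_and]
  rcases Nat.lt_or_ge (coverage s) 20 with h | h
  · rw [if_pos (hcount.mpr h), if_neg (by omega)]
  · have h20 : coverage s = 20 := le_antisymm (coverage_le s) h
    rw [if_neg (by rw [hcount]; omega), if_pos h20]
    omega

lemma alt_eq_map (c_solutions : List (List Int)) (total : Int) :
    evaluate_alt c_solutions total = c_solutions.map (fun s =>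
      let k : Int := (PySem.Set.ofList (s.filter (fun v => 0 ≤ v && v < 20))).length
      (s, if k == 20 then k else k - total)) := by
  unfold evaluate_alt
  exact PySem.List.foldl_append_singleton_eq_map _ c_solutions []

-- ===== VERDICT (by name: the statement is the Claim_ definition above) =====
theorem evaluate_spec : Claim_equal_evaluate := by
  intro c_solutions total _ _
  unfold Spec_evaluate
  rw [alt_eq_map]
  unfold evaluate
  refine List.map_congr_left ?_
  intro s _
  rw [evaluateOne_eq, set_len_eq_coverage]
  by_cases h : coverage s = 20
  · simp [h]
  · have hne : (((coverage s : Int)) == 20) = false := by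
      rw [beq_eq_false_iff_ne]; exact_mod_cast h
    simp [h, hne]
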